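-- pv_equiv track=rewrite | github.com/ryangrimsley/eecs-268-labs | Lab 5/Exercise 3/main.py | vth_mode
-- ===== SOURCE A (Python) =====
-- def ith_mode(i):
--     if i == 0:
--         return 0
--     elif i ==1:
--         return 1
--     else:
--         return ith_mode(i-1)+ith_mode(i-2)
--
-- def vth_mode(i):
--     if i == 0:
--         return True
--     elif i == 1:
--         return True
--     elif i == 2:
--         return True
--     else:
--         for j in range(2,i):
--             if ith_mode(j-1)+ith_mode(j-2) == i:
--                 return True
--
--         return False
-- ===== SOURCE B (Python) =====
-- def vth_mode(i):
--     if 0 <= i <= 2: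
--         return True
--     a, b = 1, 2
--     while b < i:
--         a, b = b, a + b
--     return b == i
-- ===== Notes on version B (the rewrite author's own statement) =====
-- stated objective: faster
-- what changed: Replaces the loop over j with an exponential-time recursive Fibonacci evaluation at each step by a single iterative running pair that walks the Fibonacci sequence once until it reaches i.
-- intended difference: For i = 3 and i = 5 A's loop range(2, i) ends before the index whose Fibonacci value is i, so A returns False on these two Fibonacci numbers while B returns True, the intended value for a Fibonacci-membership test. — e.g. on vth_mode(3): A returns false, B returns true
import Mathlib
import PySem

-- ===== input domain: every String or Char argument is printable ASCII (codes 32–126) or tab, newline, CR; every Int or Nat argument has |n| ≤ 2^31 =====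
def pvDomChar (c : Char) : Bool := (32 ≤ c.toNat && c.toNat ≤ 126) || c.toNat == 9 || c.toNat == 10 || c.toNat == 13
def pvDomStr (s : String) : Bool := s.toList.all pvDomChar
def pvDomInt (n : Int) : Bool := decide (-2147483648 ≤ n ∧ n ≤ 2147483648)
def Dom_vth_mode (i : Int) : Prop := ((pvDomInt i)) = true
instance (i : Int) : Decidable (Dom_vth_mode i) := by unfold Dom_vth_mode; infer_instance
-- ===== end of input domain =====

-- B replaces A's per-candidate exponential recursive Fibonacci evaluation by one iterative
-- running-pair walk of the Fibonacci sequence (objective: faster, asymptotic).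


-- ===== PORT A =====
-- ith_mode: Python's recursive Fibonacci. The recursion is exact for i ≥ 0
-- (Python diverges for i < 0; vth_mode only calls it with arguments ≥ 0),
-- written on Nat so the literal double recursion is structurally terminating.
def ith_modeNat : Nat → Int
  | 0 => 0
  | 1 => 1
  | n + 2 => ith_modeNat (n + 1) + ith_modeNat n

def ith_mode (i : Int) : Int := ith_modeNat i.toNat

-- 'for j in range(2, i): if …: return True' / 'return False' is List.any over the range
def vth_mode (i : Int) : Bool :=
  if i == 0 then true
  else if i == 1 then true
  else if i == 2 then true
  else
    (PySem.List.pyRange 2 i 1).any (fun j => ith_mode (j - 1) + ith_mode (j - 2) == i)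

-- ===== PORT B =====
-- 'while b < i: a, b = b, a + b'; fuel i.toNat only makes the loop total
-- (b starts at 2 and grows by at least 1 per step, so the fuel is never exhausted first)
def fibLoop : Nat → Int → Int → Int → Int
  | 0, _, b, _ => b
  | f + 1, a, b, i => if b < i then fibLoop f b (a + b) i else b

def vth_mode_alt (i : Int) : Bool :=
  if 0 ≤ i ∧ i ≤ 2 then true
  else fibLoop i.toNat 1 2 i == i

-- ===== PRECONDITION & SPEC =====
-- For i = 3 and i = 5 A's loop range(2, i) ends before the index whose Fibonacci value is i,
-- so A returns False on these two Fibonacci numbers while B returns True, the intended value.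
def D_vth_mode (i : Int) : Prop := i = 3 ∨ i = 5
instance (i : Int) : Decidable (D_vth_mode i) := by unfold D_vth_mode; infer_instance

def Spec_vth_mode (i : Int) (out : Bool) : Prop := ¬ D_vth_mode i → out = vth_mode_alt i
instance (i : Int) (out : Bool) : Decidable (Spec_vth_mode i out) := by unfold Spec_vth_mode; infer_instance

def pvDiffWitness_vth_mode : Int := 3
def pvDiffWitnessOut_vth_mode : Bool × Bool := (false, true)

-- ===== CLAIM =====
def Claim_unchanged_vth_mode : Prop := ∀ (i : Int), Dom_vth_mode i → Spec_vth_mode i (vth_mode i)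
def Claim_changed_vth_mode : Prop := Dom_vth_mode (pvDiffWitness_vth_mode) ∧ D_vth_mode (pvDiffWitness_vth_mode) ∧ vth_mode (pvDiffWitness_vth_mode) = pvDiffWitnessOut_vth_mode.1 ∧ vth_mode_alt (pvDiffWitness_vth_mode) = pvDiffWitnessOut_vth_mode.2 ∧ pvDiffWitnessOut_vth_mode.1 ≠ pvDiffWitnessOut_vth_mode.2
def Claim_exact_vth_mode : Prop := ∀ (i : Int), Dom_vth_mode i → D_vth_mode i → vth_mode i ≠ vth_mode_alt i

-- ===== LEMMAS AND PROOFS =====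

theorem fib_pos : ∀ n, 1 ≤ n → 1 ≤ ith_modeNat n := by
  intro n
  induction n using Nat.strong_induction_on with
  | _ n ih =>
    match n with
    | 0 => intro h; omega
    | 1 => intro _; decide
    | 2 => intro _; decide
    | (m + 3) =>
      intro _
      have h1 := ih (m + 2) (by omega) (by omega)
      have h0 : 0 ≤ ith_modeNat (m + 1) := by
        match m with
        | 0 => decide
        | k + 1 => exact le_trans (by norm_num) (ih (k + 2) (by omega) (by omega))
      have e : ith_modeNat (m + 3) = ith_modeNat (m + 2) + ith_modeNat (m + 1) := rfl
      omega

theorem fib_strict_mono : ∀ m n, 2 ≤ m → m < n → ith_modeNat m < ith_modeNat n := by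
  have step : ∀ n, 2 ≤ n → ith_modeNat n < ith_modeNat (n + 1) := by
    intro n hn
    match n, hn with
    | (m + 2), _ =>
      have hp := fib_pos (m + 1) (by omega)
      have e : ith_modeNat (m + 2 + 1) = ith_modeNat (m + 2) + ith_modeNat (m + 1) := rfl
      omega
  intro m n hm hlt
  induction n with
  | zero => omega
  | succ k ih =>
    rcases Nat.lt_or_ge m k with h | h
    · exact lt_trans (ih h) (step k (by omega))
    · have : m = k := by omega
      subst this
      exact step m hm

theorem fib_mono : ∀ m n, 2 ≤ m → m ≤ n → ith_modeNat m ≤ ith_modeNat n := by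
  intro m n hm h
  rcases Nat.lt_or_ge m n with h' | h'
  · exact le_of_lt (fib_strict_mono m n hm h')
  · have : m = n := by omega
    subst this; exact le_refl _

theorem fib_gt_self : ∀ n : Nat, 6 ≤ n → (n : Int) < ith_modeNat n := by
  intro n
  induction n using Nat.strong_induction_on with
  | _ n ih =>
    intro h
    match n, h with
    | 6, _ => decide
    | 7, _ => decide
    | (m + 8), _ =>
      have h1 := ih (m + 7) (by omega) (by omega)
      have h2 : 1 ≤ ith_modeNat (m + 6) := fib_pos _ (by omega)
      have e : ith_modeNat (m + 8) = ith_modeNat (m + 7) + ith_modeNat (m + 6) := rfl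
      push_cast at h1 ⊢
      omega

-- A-side characterisation for i ≥ 3
theorem vth_mode_char (i : Int) (hi : 3 ≤ i) :
    vth_mode i = true ↔ ∃ n : Nat, 2 ≤ n ∧ (n : Int) < i ∧ ith_modeNat n = i := by
  have hA : vth_mode i
      = (PySem.List.pyRange 2 i 1).any (fun j => ith_mode (j - 1) + ith_mode (j - 2) == i) := by
    simp only [vth_mode, beq_iff_eq]
    rw [if_neg (by omega), if_neg (by omega), if_neg (by omega)]
  rw [hA]
  simp only [List.any_eq_true, PySem.List.mem_pyRange_one, beq_iff_eq]
  constructor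
  · rintro ⟨j, ⟨hj2, hji⟩, hval⟩
    refine ⟨j.toNat, by omega, by omega, ?_⟩
    have hj : j.toNat = (j.toNat - 2) + 2 := by omega
    have hm1 : (j - 1).toNat = (j.toNat - 2) + 1 := by omega
    have hm2 : (j - 2).toNat = j.toNat - 2 := by omega
    simp only [ith_mode, hm1, hm2] at hval
    rw [hj]
    exact hval
  · rintro ⟨n, hn2, hni, hval⟩
    refine ⟨(n : Int), ⟨by omega, hni⟩, ?_⟩
    have hm1 : ((n : Int) - 1).toNat = (n - 2) + 1 := by omega
    have hm2 : ((n : Int) - 2).toNat = n - 2 := by omega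
    simp only [ith_mode, hm1, hm2]
    have hn : n = (n - 2) + 2 := by omega
    rw [hn] at hval
    exact hval

-- B-side loop invariant: from state (fib n, fib (n+1)) with fib n < i and enough fuel,
-- the loop result equals i iff some later Fibonacci number equals i
theorem fibLoop_char : ∀ (fuel : Nat) (n : Nat) (i : Int), 2 ≤ n →
    ith_modeNat n < i → (i - ith_modeNat (n + 1)).toNat ≤ fuel →
    (fibLoop fuel (ith_modeNat n) (ith_modeNat (n + 1)) i = i ↔
      ∃ m : Nat, n + 1 ≤ m ∧ ith_modeNat m = i) := by
  intro fuel
  induction fuel with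
  | zero =>
    intro n i hn _ hfuel
    have hb : i ≤ ith_modeNat (n + 1) := by omega
    simp only [fibLoop]
    constructor
    · intro h; exact ⟨n + 1, le_refl _, h⟩
    · rintro ⟨m, hm, hval⟩
      have := fib_mono (n + 1) m (by omega) hm
      omega
  | succ f ih =>
    intro n i hn hlt hfuel
    simp only [fibLoop]
    by_cases hb : ith_modeNat (n + 1) < i
    · rw [if_pos hb]
      have hsum : ith_modeNat n + ith_modeNat (n + 1) = ith_modeNat (n + 2) := by
        have e : ith_modeNat (n + 2) = ith_modeNat (n + 1) + ith_modeNat n := rfl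
        omega
      rw [hsum]
      have hp : 1 ≤ ith_modeNat (n + 1) := fib_pos (n + 1) (by omega)
      have hfuel' : (i - ith_modeNat (n + 2)).toNat ≤ f := by
        have hp2 : 1 ≤ ith_modeNat n := fib_pos n (by omega)
        have e : ith_modeNat (n + 2) = ith_modeNat (n + 1) + ith_modeNat n := rfl
        omega
      rw [ih (n + 1) i (by omega) hb hfuel']
      constructor
      · rintro ⟨m, hm, hval⟩; exact ⟨m, by omega, hval⟩
      · rintro ⟨m, hm, hval⟩
        refine ⟨m, ?_, hval⟩
        rcases Nat.lt_or_ge m (n + 2) with h' | h'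
        · have : m = n + 1 := by omega
          subst this; omega
        · exact h'
    · rw [if_neg hb]
      constructor
      · intro h; exact ⟨n + 1, le_refl _, h⟩
      · rintro ⟨m, hm, hval⟩
        have := fib_mono (n + 1) m (by omega) hm
        omega

-- B-side characterisation for i ≥ 3
theorem vth_mode_alt_char (i : Int) (hi : 3 ≤ i) :
    vth_mode_alt i = true ↔ ∃ m : Nat, 3 ≤ m ∧ ith_modeNat m = i := by
  have hcond : ¬ (0 ≤ i ∧ i ≤ 2) := by omega
  simp only [vth_mode_alt, if_neg hcond, beq_iff_eq]
  have h2 : ith_modeNat 2 = 1 := by decide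
  have h3 : ith_modeNat 3 = 2 := by decide
  have hfuel : (i - ith_modeNat 3).toNat ≤ i.toNat := by omega
  have := fibLoop_char i.toNat 2 i (le_refl _) (by omega) hfuel
  rw [h2, h3] at this
  exact this

theorem main_equiv (i : Int) (hD : ¬ D_vth_mode i) : vth_mode i = vth_mode_alt i := by
  rcases lt_or_ge i 3 with hlt | hge
  · rcases lt_or_ge i 0 with hneg | hpos
    · -- i < 0: A's range is empty, B's loop has fuel 0 and b = 2 ≠ i
      have hA : vth_mode i = false := by
        simp only [vth_mode, beq_iff_eq]
        rw [if_neg (by omega), if_neg (by omega), if_neg (by omega),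
          PySem.List.pyRange_one_eq_nil (by omega : i ≤ 2)]
        rfl
      have hB : vth_mode_alt i = false := by
        have hcond : ¬ (0 ≤ i ∧ i ≤ 2) := by omega
        have hz : i.toNat = 0 := by omega
        simp only [vth_mode_alt, if_neg hcond, hz, fibLoop]
        simp only [beq_eq_false_iff_ne, ne_eq]
        omega
      rw [hA, hB]
    · -- 0 ≤ i < 3: both true
      interval_cases i <;> decide
  · -- 3 ≤ i, i ≠ 3, i ≠ 5
    have h3 : i ≠ 3 := fun h => hD (Or.inl h)
    have h5 : i ≠ 5 := fun h => hD (Or.inr h)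
    cases hA : vth_mode i <;> cases hB : vth_mode_alt i
    · rfl
    · -- A false, B true: the fib witness m satisfies m ≥ 6, hence m < i, so A would be true
      exfalso
      rcases (vth_mode_alt_char i hge).mp hB with ⟨m, hm3, hval⟩
      have hm6 : 6 ≤ m := by
        rcases Nat.lt_or_ge m 6 with h' | h'
        · exfalso
          interval_cases m
          · have : ith_modeNat 3 = 2 := by decide
            omega
          · exact h3 (by rw [← hval]; decide)
          · exact h5 (by rw [← hval]; decide)
        · exact h'
      have hmi : (m : Int) < i := by
        have := fib_gt_self m hm6
        omega
      have : vth_mode i = true := (vth_mode_char i hge).mpr ⟨m, by omega, hmi, hval⟩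
      rw [hA] at this
      exact Bool.false_ne_true this
    · -- A true, B false: A's witness n is ≥ 3 (fib 2 = 1 < 3 ≤ i), so B would be true
      exfalso
      rcases (vth_mode_char i hge).mp hA with ⟨n, hn2, _, hval⟩
      have hn3 : 3 ≤ n := by
        rcases Nat.lt_or_ge n 3 with h' | h'
        · exfalso
          have : n = 2 := by omega
          subst this
          have : ith_modeNat 2 = 1 := by decide
          omega
        · exact h'
      have : vth_mode_alt i = true := (vth_mode_alt_char i hge).mpr ⟨n, hn3, hval⟩
      rw [hB] at this
      exact Bool.false_ne_true this
    · rfl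

-- ===== VERDICT =====
theorem vth_mode_spec : Claim_unchanged_vth_mode := by
  intro i _ hD
  exact main_equiv i hD

theorem vth_mode_changed : Claim_changed_vth_mode := by
  unfold Claim_changed_vth_mode; decide

theorem vth_mode_tight : Claim_exact_vth_mode := by
  intro i _ hD
  rcases hD with h | h <;> subst h <;> decide
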